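-- pv_equiv track=rewrite | github.com/rezikharebava/GOA-HW | level 42/HW/HW42.py | double_char
-- ===== SOURCE A (Python) =====
-- def double_char(s):
--     ls = s.split(" ")
--     ls3 = []
--     for i in ls:
--         ls2 = []
--         for j in i:
--             ls2.append(j)
--             ls2.append(j)
--         ls3.append("".join(ls2))
--     return "  ".join(ls3)
-- ===== SOURCE B (Python) =====
-- def double_char(s):
--     return "".join(c * 2 for c in s)
-- ===== Notes on version B (the rewrite author's own statement) =====
-- stated objective: simpler
-- what changed: B drops the split-into-words / double-per-word / rejoin-with-double-space pipeline and doubles every character of the whole string in one flat pass, since doubling the single-space separators is exactly what the double-space rejoin produced.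
import Mathlib
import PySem

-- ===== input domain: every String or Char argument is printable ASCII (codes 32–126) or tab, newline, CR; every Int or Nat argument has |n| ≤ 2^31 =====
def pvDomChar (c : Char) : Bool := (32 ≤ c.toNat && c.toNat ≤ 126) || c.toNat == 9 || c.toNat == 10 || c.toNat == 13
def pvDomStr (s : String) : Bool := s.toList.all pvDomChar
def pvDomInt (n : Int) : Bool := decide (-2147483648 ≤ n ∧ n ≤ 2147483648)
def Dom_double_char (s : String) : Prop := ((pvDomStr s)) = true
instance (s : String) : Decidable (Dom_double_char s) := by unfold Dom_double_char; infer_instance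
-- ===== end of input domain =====

-- B replaces A's split-on-space / double-each-word / rejoin-with-double-space pipeline by one
-- flat pass doubling every character (objective: simpler; same result, spaces double too).

-- ===== PORT A =====
def double_char (s : String) : String :=
  let ls : List String := (PySem.Chars.splitOn s.toList " ".toList).map String.ofList
  let ls3 : List String := ls.foldl (fun ls3 i =>
    let ls2 : List Char := i.toList.foldl (fun ls2 j => ls2 ++ [j, j]) []
    ls3 ++ [String.ofList ls2]) []
  PySem.Str.join "  " ls3

-- ===== PORT B =====
def double_char_alt (s : String) : String :=
  String.ofList (s.toList.flatMap (fun c => [c, c]))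

-- ===== PRECONDITION & SPEC =====
def Spec_double_char (s : String) (out : String) : Prop := out = double_char_alt s
instance (s : String) (out : String) : Decidable (Spec_double_char s out) := by unfold Spec_double_char; infer_instance

-- ===== CLAIM (what is proved, stated in full; the proofs are below) =====
def Claim_equal_double_char : Prop := ∀ (s : String), Dom_double_char s → Spec_double_char s (double_char s)

-- ===== LEMMAS AND PROOFS =====

-- doubling a char list, the common currency of the proof
def pvDbl (l : List Char) : List Char := l.flatMap (fun c => [c, c])

theorem pvDbl_append (a b : List Char) : pvDbl (a ++ b) = pvDbl a ++ pvDbl b := by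
  simp [pvDbl]

theorem foldl_double (l : List Char) (acc : List Char) :
    l.foldl (fun ls2 j => ls2 ++ [j, j]) acc = acc ++ pvDbl l := by
  induction l generalizing acc with
  | nil => simp [pvDbl]
  | cons c t ih => simp [List.foldl, ih, pvDbl]

theorem foldl_push {α β : Type} (l : List α) (f : α → β) (acc : List β) :
    l.foldl (fun a i => a ++ [f i]) acc = acc ++ l.map f := by
  induction l generalizing acc with
  | nil => simp
  | cons x t ih => simp [List.foldl, ih]

theorem inter_cons (sep x : List Char) (L : List (List Char)) (h : L ≠ []) :
    List.intercalate sep (x :: L) = x ++ sep ++ List.intercalate sep L := by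
  cases L with
  | nil => exact absurd rfl h
  | cons y t => simp [List.intercalate, List.intersperse]

theorem inter2 (sep : List Char) (X : List (List Char)) (a b : List Char) :
    List.intercalate sep (X ++ [a, b]) = List.intercalate sep (X ++ [a ++ sep ++ b]) := by
  induction X with
  | nil => simp [List.intercalate, List.intersperse]
  | cons x t ih =>
      rw [List.cons_append, List.cons_append,
        inter_cons sep x (t ++ [a, b]) (by simp),
        inter_cons sep x (t ++ [a ++ sep ++ b]) (by simp), ih]

theorem go_join (sep : List Char) (hsep : sep ≠ []) :
    ∀ (fuel : Nat) (l cur : List Char) (acc : List (List Char)), l.length ≤ fuel →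
      List.intercalate sep (PySem.Chars.splitOn.go sep fuel l cur acc) =
      List.intercalate sep (acc.reverse ++ [cur.reverse ++ l]) := by
  intro fuel
  induction fuel with
  | zero =>
      intro l cur acc h
      have hl : l = [] := List.eq_nil_of_length_eq_zero (Nat.le_zero.mp h)
      subst hl
      simp [PySem.Chars.splitOn.go]
  | succ n ih =>
      intro l cur acc h
      cases l with
      | nil => simp [PySem.Chars.splitOn.go]
      | cons c rest =>
          rw [PySem.Chars.splitOn.go]
          by_cases hp : sep.isPrefixOf (c :: rest) = true
          · rw [if_pos hp]
            have hpre : sep <+: (c :: rest) := List.isPrefixOf_iff_prefix.mp hp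
            obtain ⟨t, ht⟩ := hpre
            have hslen : 1 ≤ sep.length := by
              cases sep with
              | nil => exact absurd rfl hsep
              | cons _ _ => simp
            have hd : (List.drop sep.length (c :: rest)) = t := by
              rw [← ht, List.drop_left]
            have hlen : (List.drop sep.length (c :: rest)).length ≤ n := by
              rw [List.length_drop]
              have := h
              simp only [List.length_cons] at this
              omega
            rw [ih _ _ _ hlen, hd]
            have : (cur.reverse :: acc).reverse = acc.reverse ++ [cur.reverse] := by simp
            rw [this]
            have h2 : acc.reverse ++ [cur.reverse] ++ [List.reverse [] ++ t]
                = acc.reverse ++ [cur.reverse, t] := by simp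
            rw [h2, inter2 sep acc.reverse cur.reverse t, ← ht]
            simp
          · rw [if_neg hp]
            have hlen : rest.length ≤ n := by
              simp only [List.length_cons] at h; omega
            rw [ih _ _ _ hlen]
            simp

theorem join_splitOn (sep l : List Char) (hsep : sep ≠ []) :
    List.intercalate sep (PySem.Chars.splitOn l sep) = l := by
  unfold PySem.Chars.splitOn
  rw [go_join sep hsep (l.length + 1) l [] [] (by omega)]
  simp [List.intercalate]

theorem dbl_intercalate (sep : List Char) (X : List (List Char)) :
    pvDbl (List.intercalate sep X) = List.intercalate (pvDbl sep) (X.map pvDbl) := by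
  induction X with
  | nil => simp [List.intercalate, pvDbl]
  | cons x t ih =>
      cases t with
      | nil => simp [List.intercalate, List.intersperse]
      | cons y u =>
          rw [inter_cons sep x (y :: u) (by simp), List.map_cons,
            inter_cons (pvDbl sep) (pvDbl x) ((y :: u).map pvDbl) (by simp),
            pvDbl_append, pvDbl_append, ih]

-- ===== VERDICT (by name: the statement is the Claim_ definition above) =====
theorem double_char_spec : Claim_equal_double_char := by
  intro s _
  unfold Spec_double_char double_char double_char_alt PySem.Str.join
  simp only [foldl_double, foldl_push, List.nil_append, List.map_map]
  congr 1
  have hmap : ∀ i : List Char,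
      (String.toList ∘ (fun i => String.ofList (pvDbl i.toList)) ∘ String.ofList) i = pvDbl i := by
    intro i; simp
  rw [List.map_congr_left (fun i _ => hmap i)]
  have hsep2 : ("  " : String).toList = pvDbl (" ".toList) := by decide
  rw [hsep2]
  show List.intercalate (pvDbl " ".toList) _ = _
  rw [← dbl_intercalate, join_splitOn " ".toList s.toList (by decide)]
  rfl
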